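-- pv_equiv track=rewrite | github.com/kellyxlung-code/radar | backend/models.py | get_category_from_tags
-- ===== SOURCE A (Python) =====
-- def get_category_from_tags(tags: list) -> str:
--     """
--     Determine category from Google Places types or AI-extracted tags
--     Matches Google Places API type strings
--     """
--     if not tags:
--         return "eat"  # Default
--
--     tags_lower = [t.lower() for t in tags]
--
--     # Cafes (Google Places: "cafe", "coffee_shop")
--     if any(word in tags_lower for word in ["cafe", "coffee", "espresso", "latte", "cappuccino", "coffee_shop"]):
--         return "cafes"
--
--     # Bars (Google Places: "bar", "night_club", "liquor_store")
--     if any(word in tags_lower for word in ["bar", "cocktail", "wine", "beer", "pub", "nightlife", "night_club", "liquor_store"]):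
--         return "bars"
--
--     # Shops (Google Places: "store", "clothing_store", "shopping_mall")
--     if any(word in tags_lower for word in ["shop", "store", "boutique", "retail", "shopping", "clothing_store", "shopping_mall", "book_store", "jewelry_store"]):
--         return "shops"
--
--     # Leisure (Google Places: "movie_theater", "amusement_park", "bowling_alley")
--     if any(word in tags_lower for word in ["cinema", "theater", "entertainment", "activity", "fun", "movie_theater", "amusement_park", "bowling_alley", "casino", "stadium"]):
--         return "leisure"
--
--     # Go out (Google Places: "night_club", "tourist_attraction")
--     if any(word in tags_lower for word in ["event", "party", "club", "experience", "rooftop", "tourist_attraction"]):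
--         return "go_out"
--
--     # Nature (Google Places: "park", "natural_feature", "campground")
--     if any(word in tags_lower for word in ["park", "nature", "hiking", "beach", "outdoor", "natural_feature", "campground"]):
--         return "nature"
--
--     # Culture (Google Places: "museum", "art_gallery", "library")
--     if any(word in tags_lower for word in ["museum", "gallery", "art", "culture", "exhibition", "art_gallery", "library"]):
--         return "culture"
--
--     # Restaurants (Google Places: "restaurant", "meal_delivery", "meal_takeaway")
--     # Check restaurants LAST because many places have "restaurant" as a secondary type
--     if any(word in tags_lower for word in ["restaurant", "dining", "food", "cuisine", "noodles", "dim sum", "meal_delivery", "meal_takeaway"]):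
--         return "eat"
--
--     # Default to eat (most common)
--     return "eat"
-- ===== SOURCE B (Python) =====
-- _CATEGORY_KEYWORDS = [
--     ("cafes", ["cafe", "coffee", "espresso", "latte", "cappuccino", "coffee_shop"]),
--     ("bars", ["bar", "cocktail", "wine", "beer", "pub", "nightlife", "night_club", "liquor_store"]),
--     ("shops", ["shop", "store", "boutique", "retail", "shopping", "clothing_store", "shopping_mall", "book_store", "jewelry_store"]),
--     ("leisure", ["cinema", "theater", "entertainment", "activity", "fun", "movie_theater", "amusement_park", "bowling_alley", "casino", "stadium"]),
--     ("go_out", ["event", "party", "club", "experience", "rooftop", "tourist_attraction"]),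
--     ("nature", ["park", "nature", "hiking", "beach", "outdoor", "natural_feature", "campground"]),
--     ("culture", ["museum", "gallery", "art", "culture", "exhibition", "art_gallery", "library"]),
--     ("eat", ["restaurant", "dining", "food", "cuisine", "noodles", "dim sum", "meal_delivery", "meal_takeaway"]),
-- ]
--
-- # keyword -> priority rank of its category (no keyword belongs to two categories)
-- _KW_RANK = {w: i for i, (_cat, kws) in enumerate(_CATEGORY_KEYWORDS) for w in kws}
--
--
-- def get_category_from_tags(tags: list) -> str:
--     """One pass over the tags against a prebuilt keyword->rank index,
--     tracking the best (lowest) category rank seen."""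
--     best = len(_CATEGORY_KEYWORDS)  # 8 = "no keyword matched"
--     for t in [t.lower() for t in tags]:
--         r = _KW_RANK.get(t, 8)
--         if r < best:
--             best = r
--     return _CATEGORY_KEYWORDS[best][0] if best < 8 else "eat"
-- ===== Notes on version B (the rewrite author's own statement) =====
-- stated objective: alternative
-- what changed: Replaces eight sequential any(word in tags_lower) membership scans with a single pass over the tags against a prebuilt keyword->rank dict, tracking the minimum category rank.
import Mathlib
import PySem

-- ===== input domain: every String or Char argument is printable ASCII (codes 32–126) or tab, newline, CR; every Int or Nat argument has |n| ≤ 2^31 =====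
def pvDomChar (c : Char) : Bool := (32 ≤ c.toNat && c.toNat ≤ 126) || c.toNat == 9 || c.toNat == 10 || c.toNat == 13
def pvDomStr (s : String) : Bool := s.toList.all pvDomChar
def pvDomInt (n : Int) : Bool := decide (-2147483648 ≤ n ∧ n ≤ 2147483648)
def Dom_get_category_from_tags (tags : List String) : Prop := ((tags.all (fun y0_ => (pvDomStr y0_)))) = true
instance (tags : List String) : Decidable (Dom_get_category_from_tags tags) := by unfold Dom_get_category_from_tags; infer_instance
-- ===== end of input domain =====

set_option maxRecDepth 4096


-- B replaces A's eight sequential membership scans by a single pass over the tags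
-- against a prebuilt keyword->rank index, tracking the minimum category rank.

-- ===== PORT A =====
def get_category_from_tags (tags : List String) : String :=
  if tags = [] then "eat"
  else
    let tags_lower := tags.map PySem.Str.lower
    if (["cafe", "coffee", "espresso", "latte", "cappuccino", "coffee_shop"].any
        fun w => tags_lower.contains w) then "cafes"
    else if (["bar", "cocktail", "wine", "beer", "pub", "nightlife", "night_club", "liquor_store"].any
        fun w => tags_lower.contains w) then "bars"
    else if (["shop", "store", "boutique", "retail", "shopping", "clothing_store", "shopping_mall", "book_store", "jewelry_store"].any
        fun w => tags_lower.contains w) then "shops"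
    else if (["cinema", "theater", "entertainment", "activity", "fun", "movie_theater", "amusement_park", "bowling_alley", "casino", "stadium"].any
        fun w => tags_lower.contains w) then "leisure"
    else if (["event", "party", "club", "experience", "rooftop", "tourist_attraction"].any
        fun w => tags_lower.contains w) then "go_out"
    else if (["park", "nature", "hiking", "beach", "outdoor", "natural_feature", "campground"].any
        fun w => tags_lower.contains w) then "nature"
    else if (["museum", "gallery", "art", "culture", "exhibition", "art_gallery", "library"].any
        fun w => tags_lower.contains w) then "culture"
    else if (["restaurant", "dining", "food", "cuisine", "noodles", "dim sum", "meal_delivery", "meal_takeaway"].any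
        fun w => tags_lower.contains w) then "eat"
    else "eat"

-- ===== PORT B =====
def pvCategoryKeywords : List (String × List String) :=
  [ ("cafes", ["cafe", "coffee", "espresso", "latte", "cappuccino", "coffee_shop"]),
    ("bars", ["bar", "cocktail", "wine", "beer", "pub", "nightlife", "night_club", "liquor_store"]),
    ("shops", ["shop", "store", "boutique", "retail", "shopping", "clothing_store", "shopping_mall", "book_store", "jewelry_store"]),
    ("leisure", ["cinema", "theater", "entertainment", "activity", "fun", "movie_theater", "amusement_park", "bowling_alley", "casino", "stadium"]),
    ("go_out", ["event", "party", "club", "experience", "rooftop", "tourist_attraction"]),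
    ("nature", ["park", "nature", "hiking", "beach", "outdoor", "natural_feature", "campground"]),
    ("culture", ["museum", "gallery", "art", "culture", "exhibition", "art_gallery", "library"]),
    ("eat", ["restaurant", "dining", "food", "cuisine", "noodles", "dim sum", "meal_delivery", "meal_takeaway"]) ]

-- {w: i for i, (_cat, kws) in enumerate(_CATEGORY_KEYWORDS) for w in kws}
def pvKwRank : PySem.Dict String Int :=
  PySem.Dict.ofList ((PySem.List.enumerate pvCategoryKeywords 0).flatMap
    (fun p => p.2.2.map (fun w => (w, p.1))))

def get_category_from_tags_alt (tags : List String) : String :=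
  let best := (tags.map PySem.Str.lower).foldl
    (fun best t =>
      let r := pvKwRank.getD t 8
      if r < best then r else best)
    (pvCategoryKeywords.length : Int)
  if best < 8 then PySem.List.pyGetD (pvCategoryKeywords.map Prod.fst) best "eat" else "eat"

-- ===== PRECONDITION & SPEC =====
def Spec_get_category_from_tags (tags : List String) (out : String) : Prop := out = get_category_from_tags_alt tags
instance (tags : List String) (out : String) : Decidable (Spec_get_category_from_tags tags out) := by unfold Spec_get_category_from_tags; infer_instance

-- ===== CLAIM (what is proved, stated in full; the proofs are below) =====
def Claim_equal_get_category_from_tags : Prop := ∀ (tags : List String), Dom_get_category_from_tags tags → Spec_get_category_from_tags tags (get_category_from_tags tags)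

-- ===== LEMMAS AND PROOFS =====

def pvL (i : Nat) : List String := (pvCategoryKeywords.getD i ("eat", [])).2

def pvRank (t : String) : Int := pvKwRank.getD t 8

def pvStep (best : Int) (t : String) : Int :=
  let r := pvRank t
  if r < best then r else best

def pvCond (ts : List String) (j : Nat) : Bool := (pvL j).any fun w => ts.contains w

lemma pvAlt_eq (tags : List String) :
    get_category_from_tags_alt tags =
      (if (tags.map PySem.Str.lower).foldl pvStep 8 < 8
       then PySem.List.pyGetD (pvCategoryKeywords.map Prod.fst)
              ((tags.map PySem.Str.lower).foldl pvStep 8) "eat"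
       else "eat") := rfl

lemma pvA_eq (tags : List String) (h : tags ≠ []) :
    get_category_from_tags tags =
      (if pvCond (tags.map PySem.Str.lower) 0 then "cafes"
       else if pvCond (tags.map PySem.Str.lower) 1 then "bars"
       else if pvCond (tags.map PySem.Str.lower) 2 then "shops"
       else if pvCond (tags.map PySem.Str.lower) 3 then "leisure"
       else if pvCond (tags.map PySem.Str.lower) 4 then "go_out"
       else if pvCond (tags.map PySem.Str.lower) 5 then "nature"
       else if pvCond (tags.map PySem.Str.lower) 6 then "culture"
       else if pvCond (tags.map PySem.Str.lower) 7 then "eat"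
       else "eat") := by
  simp only [get_category_from_tags, if_neg h, pvCond, pvL]
  rfl

lemma pvCond_true_iff (ts : List String) (j : Nat) :
    pvCond ts j = true ↔ ∃ w ∈ pvL j, w ∈ ts := by
  simp [pvCond]

lemma pvFold_le_init (ts : List String) (b : Int) : ts.foldl pvStep b ≤ b := by
  induction ts generalizing b with
  | nil => simp
  | cons t ts ih =>
    refine le_trans (ih (pvStep b t)) ?_
    simp only [pvStep]
    split <;> omega

lemma pvFold_le_mem (t : String) :
    ∀ (ts : List String) (b : Int), t ∈ ts → ts.foldl pvStep b ≤ pvRank t := by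
  intro ts
  induction ts with
  | nil => intro b h; cases h
  | cons u ts ih =>
    intro b h
    simp only [List.foldl_cons]
    rcases List.mem_cons.mp h with rfl | h
    · refine le_trans (pvFold_le_init ts (pvStep b t)) ?_
      simp only [pvStep]; split <;> omega
    · exact ih (pvStep b u) h

lemma pvFold_attained (ts : List String) (b : Int) :
    ts.foldl pvStep b = b ∨ ∃ t ∈ ts, ts.foldl pvStep b = pvRank t := by
  induction ts generalizing b with
  | nil => left; rfl
  | cons u ts ih =>
    simp only [List.foldl_cons]
    rcases ih (pvStep b u) with h | ⟨t, ht, h⟩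
    · by_cases hlt : pvRank u < b
      · right
        exact ⟨u, List.mem_cons_self, by rw [h]; simp [pvStep, if_pos hlt]⟩
      · left
        rw [h]; simp [pvStep, if_neg hlt]
    · right; exact ⟨t, List.mem_cons_of_mem _ ht, h⟩

lemma pvRank_of_mem : ∀ i < 8, ∀ t ∈ pvL i, pvRank t = (i : Int) := by decide

lemma pvKeys_rank : ∀ t ∈ pvKwRank.keys, ∃ i < 8, t ∈ pvL i ∧ pvRank t = (i : Int) := by decide

lemma pvRank_cases (t : String) :
    pvRank t = 8 ∨ ∃ i < 8, t ∈ pvL i ∧ pvRank t = (i : Int) := by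
  by_cases h : pvKwRank.contains t
  · exact Or.inr (pvKeys_rank t ((PySem.Dict.contains_iff_mem_keys _ _).mp h))
  · left
    exact PySem.Dict.getD_of_not_contains _ _ (by simpa using h)

-- ===== VERDICT (by name: the statement is the Claim_ definition above) =====
theorem get_category_from_tags_spec : Claim_equal_get_category_from_tags := by
  intro tags _
  unfold Spec_get_category_from_tags
  by_cases htags : tags = []
  · subst htags; rfl
  rw [pvAlt_eq, pvA_eq tags htags]
  set ts := tags.map PySem.Str.lower with hts
  set m := ts.foldl pvStep 8 with hm
  have hm8 : m ≤ 8 := pvFold_le_init ts 8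
  have hfalse : ∀ j : Nat, j < 8 → (m ≤ (j : Int) → False) → pvCond ts j = false := by
    intro j hj hgt
    by_contra hc
    rcases (pvCond_true_iff ts j).mp (by simpa using hc) with ⟨w, hwL, hwts⟩
    have hle := pvFold_le_mem w ts 8 hwts
    rw [pvRank_of_mem j hj w hwL] at hle
    exact hgt (hm ▸ hle)
  rcases lt_or_eq_of_le hm8 with hlt | heq
  · -- some keyword matched: m is the rank of the best matching category
    rcases pvFold_attained ts 8 with h8 | ⟨t, hts', hrt⟩
    · omega
    rcases pvRank_cases t with h8 | ⟨i, hi, hmem, hri⟩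
    · omega
    have hmi : m = (i : Int) := by omega
    have hcond : pvCond ts i = true :=
      (pvCond_true_iff ts i).mpr ⟨t, hmem, hts'⟩
    have hprev : ∀ j : Nat, j < i → pvCond ts j = false := by
      intro j hj
      exact hfalse j (by omega) (by omega)
    interval_cases i
    · rw [hmi]; simp only [hcond, if_true]; decide
    · rw [hmi]
      simp only [hcond, hprev 0 (by omega), if_true, Bool.false_eq_true, if_false]
      decide
    · rw [hmi]
      simp only [hcond, hprev 0 (by omega), hprev 1 (by omega), if_true,
        Bool.false_eq_true, if_false]
      decide
    · rw [hmi]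
      simp only [hcond, hprev 0 (by omega), hprev 1 (by omega), hprev 2 (by omega),
        if_true, Bool.false_eq_true, if_false]
      decide
    · rw [hmi]
      simp only [hcond, hprev 0 (by omega), hprev 1 (by omega), hprev 2 (by omega),
        hprev 3 (by omega), if_true, Bool.false_eq_true, if_false]
      decide
    · rw [hmi]
      simp only [hcond, hprev 0 (by omega), hprev 1 (by omega), hprev 2 (by omega),
        hprev 3 (by omega), hprev 4 (by omega), if_true, Bool.false_eq_true, if_false]
      decide
    · rw [hmi]
      simp only [hcond, hprev 0 (by omega), hprev 1 (by omega), hprev 2 (by omega),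
        hprev 3 (by omega), hprev 4 (by omega), hprev 5 (by omega), if_true,
        Bool.false_eq_true, if_false]
      decide
    · rw [hmi]
      simp only [hcond, hprev 0 (by omega), hprev 1 (by omega), hprev 2 (by omega),
        hprev 3 (by omega), hprev 4 (by omega), hprev 5 (by omega), hprev 6 (by omega),
        if_true, Bool.false_eq_true, if_false]
      decide
  · -- no keyword matched: every branch condition of A is false
    have hall : ∀ j : Nat, j < 8 → pvCond ts j = false := by
      intro j hj
      exact hfalse j hj (by omega)
    rw [heq]
    simp only [hall 0 (by omega), hall 1 (by omega), hall 2 (by omega), hall 3 (by omega),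
      hall 4 (by omega), hall 5 (by omega), hall 6 (by omega), hall 7 (by omega),
      Bool.false_eq_true, if_false]
    decide
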